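-- pv_equiv track=rewrite | github.com/DuskSwan/fault_estimation_master_design | utils/features.py | merge_dict_by_suffix
-- ===== SOURCE A (Python) =====
-- def merge_dict_by_suffix(diction):
--     # 根据键值的后缀名来合并字典
--     new_dict = {}
--     for key, value in diction.items():
--         # 提取后缀
--         suffix = key.split('_')[1]
--         # 如果新字典中已经有这个后缀，就将值相加
--         if suffix in new_dict:
--             new_dict[suffix] += value
--         else:
--             new_dict[suffix] = value
--     return new_dict
-- ===== SOURCE B (Python) =====
-- def merge_dict_by_suffix(diction):
--     # Gather-per-suffix instead of incremental dict accumulation.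
--     # (Return-value equivalent to A; A additionally mutates stored value
--     # lists in place via +=, B never mutates its inputs.)
--     suffixes = [key.split('_')[1] for key in diction]
--     values = list(diction.values())
--     order = list(dict.fromkeys(suffixes))
--     return {s: [x for suf, v in zip(suffixes, values) if suf == s for x in v]
--             for s in order}
-- ===== Notes on version B (the rewrite author's own statement) =====
-- stated objective: alternative
-- what changed: B precomputes all suffixes in one pass, takes the distinct-suffix order with dict.fromkeys, and builds each merged list by a per-suffix gather over all items, instead of A's single-pass dict with conditional in-place += accumulation.
import Mathlib
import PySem

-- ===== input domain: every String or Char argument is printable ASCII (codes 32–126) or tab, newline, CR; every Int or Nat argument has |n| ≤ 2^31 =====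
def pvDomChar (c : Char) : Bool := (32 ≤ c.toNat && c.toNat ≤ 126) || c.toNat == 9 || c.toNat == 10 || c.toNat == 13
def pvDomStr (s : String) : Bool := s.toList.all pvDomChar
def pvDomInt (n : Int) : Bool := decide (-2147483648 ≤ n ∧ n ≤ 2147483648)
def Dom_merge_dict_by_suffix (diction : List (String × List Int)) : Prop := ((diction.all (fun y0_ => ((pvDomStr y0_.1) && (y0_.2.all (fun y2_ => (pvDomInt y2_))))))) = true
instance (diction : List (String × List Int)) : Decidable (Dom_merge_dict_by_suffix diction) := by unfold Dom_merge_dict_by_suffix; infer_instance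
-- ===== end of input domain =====

-- B gathers values per distinct suffix (order from first occurrences) instead of A's
-- single-pass dict accumulation; return-value equivalence only (Python A mutates stored
-- value lists in place via +=, B does not).


-- key.split('_')[1]; Pre_ guarantees the index is in range, so getD "" is never the
-- value used on admitted inputs (Python raises IndexError there).
def pvSuffix (k : String) : String := ((PySem.List.pyGet? ((PySem.Str.split? k "_").getD []) 1).getD "")

-- ===== PORT A =====
def merge_dict_by_suffix (diction : List (String × List Int)) : List (String × List Int) :=
  (diction.foldl
    (fun (nd : PySem.Dict String (List Int)) kv =>
      let suffix := pvSuffix kv.1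
      if nd.contains suffix then
        -- new_dict[suffix] += value : read, extend, store back
        nd.insert suffix (nd.getD suffix [] ++ kv.2)
      else
        nd.insert suffix kv.2)
    PySem.Dict.empty).items

-- ===== PORT B =====
def merge_dict_by_suffix_alt (diction : List (String × List Int)) : List (String × List Int) :=
  let suffixes := diction.map (fun kv => pvSuffix kv.1)
  let values := diction.map (fun kv => kv.2)
  let order := PySem.List.dedup suffixes
  order.map (fun s =>
    (s, (suffixes.zip values).flatMap (fun sv => if sv.1 == s then sv.2 else [])))

-- ===== PRECONDITION & SPEC =====
-- Pre_ excludes exactly the inputs where some key contains no '_' : there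
-- key.split('_')[1] raises IndexError in A (and in B's pre-pass alike).
def Pre_merge_dict_by_suffix (diction : List (String × List Int)) : Prop :=
  ∀ kv ∈ diction, '_' ∈ kv.1.toList
instance (diction : List (String × List Int)) : Decidable (Pre_merge_dict_by_suffix diction) := by
  unfold Pre_merge_dict_by_suffix; infer_instance

def pvWitness_merge_dict_by_suffix : (List (String × List Int)) := [("a_b", [1, 2])]

def Spec_merge_dict_by_suffix (diction : List (String × List Int)) (out : List (String × List Int)) : Prop := out = merge_dict_by_suffix_alt diction
instance (diction : List (String × List Int)) (out : List (String × List Int)) : Decidable (Spec_merge_dict_by_suffix diction out) := by unfold Spec_merge_dict_by_suffix; infer_instance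

-- ===== CLAIM (what is proved, stated in full; the proofs are below) =====
def Claim_equal_merge_dict_by_suffix : Prop := ∀ (diction : List (String × List Int)), Dom_merge_dict_by_suffix diction → Pre_merge_dict_by_suffix diction → Spec_merge_dict_by_suffix diction (merge_dict_by_suffix diction)

-- ===== LEMMAS AND PROOFS =====

-- all values of items whose suffix is s, in order
def pvGather (s : String) (l : List (String × List Int)) : List Int :=
  l.flatMap (fun kv => if pvSuffix kv.1 == s then kv.2 else [])

-- the suffixes of l not in ks, first occurrences in order
def pvDistinct (ks : List String) : List (String × List Int) → List String
  | [] => []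
  | kv :: t =>
    if pvSuffix kv.1 ∈ ks then pvDistinct ks t
    else pvSuffix kv.1 :: pvDistinct (pvSuffix kv.1 :: ks) t

theorem pvGather_nil (s : String) : pvGather s [] = [] := rfl

theorem pvGather_cons (s : String) (kv : String × List Int) (t : List (String × List Int)) :
    pvGather s (kv :: t) = (if pvSuffix kv.1 == s then kv.2 else []) ++ pvGather s t := by
  simp [pvGather]

theorem pvDistinct_not_mem {x : String} :
    ∀ (l : List (String × List Int)) (ks : List String), x ∈ pvDistinct ks l → x ∉ ks := by
  intro l
  induction l with
  | nil => intro ks h; simp [pvDistinct] at h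
  | cons kv t ih =>
    intro ks h
    by_cases hm : pvSuffix kv.1 ∈ ks
    · exact ih ks (by simpa [pvDistinct, hm] using h)
    · simp only [pvDistinct, if_neg hm, List.mem_cons] at h
      rcases h with rfl | h
      · exact hm
      · intro hx; exact (ih _ h) (List.mem_cons_of_mem _ hx)

theorem pvDistinct_congr :
    ∀ (l : List (String × List Int)) (ks1 ks2 : List String),
      (∀ x, x ∈ ks1 ↔ x ∈ ks2) → pvDistinct ks1 l = pvDistinct ks2 l := by
  intro l
  induction l with
  | nil => intro _ _ _; rfl
  | cons kv t ih =>
    intro ks1 ks2 h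
    by_cases hm : pvSuffix kv.1 ∈ ks1
    · simp only [pvDistinct, if_pos hm, if_pos ((h _).mp hm)]
      exact ih ks1 ks2 h
    · have hm2 : pvSuffix kv.1 ∉ ks2 := fun hx => hm ((h _).mpr hx)
      simp only [pvDistinct, if_neg hm, if_neg hm2]
      refine congrArg _ (ih _ _ ?_)
      intro x; simp [List.mem_cons, h x]

-- main invariant of A's fold
theorem pvFold_items :
    ∀ (l : List (String × List Int)) (d : PySem.Dict String (List Int)), d.keys.Nodup →
      (l.foldl
        (fun (nd : PySem.Dict String (List Int)) kv =>
          let suffix := pvSuffix kv.1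
          if nd.contains suffix then nd.insert suffix (nd.getD suffix [] ++ kv.2)
          else nd.insert suffix kv.2) d).items
      = d.items.map (fun p => (p.1, p.2 ++ pvGather p.1 l))
        ++ (pvDistinct d.keys l).map (fun s => (s, pvGather s l)) := by
  intro l
  induction l with
  | nil =>
    intro d _
    simp [pvDistinct, pvGather_nil]
  | cons kv t ih =>
    intro d hnd
    simp only [List.foldl_cons]
    by_cases hc : d.contains (pvSuffix kv.1) = true
    · have hmem : pvSuffix kv.1 ∈ d.keys := (PySem.Dict.contains_iff_mem_keys _ _).mp hc
      have hkeys : (d.insert (pvSuffix kv.1) (d.getD (pvSuffix kv.1) [] ++ kv.2)).keys = d.keys :=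
        PySem.Dict.keys_insert_of_contains d _ hc
      rw [if_pos hc, ih _ (by rw [hkeys]; exact hnd), hkeys]
      congr 1
      · rw [PySem.Dict.items_insert_of_contains d _ hc, List.map_map]
        apply List.map_congr_left
        intro p hp
        by_cases hps : p.1 = pvSuffix kv.1
        · have hpd : d.getD (pvSuffix kv.1) [] = p.2 := by
            have hmi : (pvSuffix kv.1, p.2) ∈ d.items := by rw [← hps]; exact hp
            exact PySem.Dict.getD_of_mem_items d hmi hnd []
          have hbeq : (p.1 == pvSuffix kv.1) = true := by simp [hps]
          simp only [Function.comp_apply, hbeq, if_true, pvGather_cons]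
          simp [hps, hpd, List.append_assoc]
        · have hbeq : (p.1 == pvSuffix kv.1) = false := by simpa using hps
          have hps' : pvSuffix kv.1 ≠ p.1 := fun hq => hps (Eq.symm hq)
          simp only [Function.comp_apply, hbeq, Bool.false_eq_true, if_false, pvGather_cons]
          simp [hps']
      · have hd : pvDistinct d.keys (kv :: t) = pvDistinct d.keys t := by
          simp [pvDistinct, hmem]
        rw [hd]
        apply List.map_congr_left
        intro x hx
        have hxs : x ≠ pvSuffix kv.1 := fun h => (pvDistinct_not_mem t d.keys hx) (h ▸ hmem)
        simp [pvGather_cons, Ne.symm hxs]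
    · have hc' : d.contains (pvSuffix kv.1) = false := by simpa using hc
      have hnmem : pvSuffix kv.1 ∉ d.keys :=
        fun h => hc ((PySem.Dict.contains_iff_mem_keys _ _).mpr h)
      have hkeys : (d.insert (pvSuffix kv.1) kv.2).keys = d.keys ++ [pvSuffix kv.1] :=
        PySem.Dict.keys_insert_of_not_contains d _ hc'
      have hnd' : (d.insert (pvSuffix kv.1) kv.2).keys.Nodup := by
        rw [hkeys]
        simp only [List.nodup_append, List.nodup_cons, List.not_mem_nil, not_false_iff,
          List.nodup_nil, and_true, true_and]
        exact ⟨hnd, fun a ha b hb => by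
          rw [List.mem_singleton] at hb
          exact fun hq => hnmem ((hq.trans hb) ▸ ha)⟩
      rw [if_neg hc, ih _ hnd', PySem.Dict.items_insert_of_not_contains d _ hc', hkeys]
      have hdc : pvDistinct (d.keys ++ [pvSuffix kv.1]) t = pvDistinct (pvSuffix kv.1 :: d.keys) t :=
        pvDistinct_congr t _ _ (by intro x; simp [List.mem_append, List.mem_cons, or_comm])
      have hdk : pvDistinct d.keys (kv :: t) = pvSuffix kv.1 :: pvDistinct (pvSuffix kv.1 :: d.keys) t := by
        simp [pvDistinct, hnmem]
      rw [hdc, hdk, List.map_append, List.append_assoc]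
      congr 1
      · apply List.map_congr_left
        intro p hp
        have hps : p.1 ≠ pvSuffix kv.1 := by
          intro h; exact hnmem (h ▸ PySem.Dict.mem_keys_of_mem_items d hp)
        have hps' : pvSuffix kv.1 ≠ p.1 := fun hq => hps hq.symm
        simp [pvGather_cons, hps']
      · simp only [List.map_cons, List.map_nil, List.singleton_append, List.map_cons]
        congr 1
        · simp [pvGather_cons]
        · apply List.map_congr_left
          intro x hx
          have hxs : x ≠ pvSuffix kv.1 := by
            have hnm := pvDistinct_not_mem t (pvSuffix kv.1 :: d.keys) hx
            intro h; exact hnm (h ▸ List.mem_cons_self)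
          simp [pvGather_cons, Ne.symm hxs]

theorem pvDistinct_append_singleton :
    ∀ (l : List (String × List Int)) (ks : List String) (kv : String × List Int),
      pvDistinct ks (l ++ [kv])
        = pvDistinct ks l
          ++ (if pvSuffix kv.1 ∈ ks ∨ pvSuffix kv.1 ∈ l.map (fun p => pvSuffix p.1)
              then [] else [pvSuffix kv.1]) := by
  intro l
  induction l with
  | nil =>
    intro ks kv
    by_cases h : pvSuffix kv.1 ∈ ks
    · rw [if_pos (Or.inl h)]; simp [pvDistinct, h]
    · rw [if_neg (by simp [h])]; simp [pvDistinct, h]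
  | cons c t ih =>
    intro ks kv
    by_cases h : pvSuffix c.1 ∈ ks
    · have e1 : pvDistinct ks ((c :: t) ++ [kv]) = pvDistinct ks (t ++ [kv]) := by
        simp [pvDistinct, h]
      have e2 : pvDistinct ks (c :: t) = pvDistinct ks t := by simp [pvDistinct, h]
      rw [e1, ih, e2]
      congr 1
      by_cases h2 : pvSuffix kv.1 ∈ ks ∨ pvSuffix kv.1 ∈ t.map (fun p => pvSuffix p.1)
      · rw [if_pos h2, if_pos]
        rcases h2 with h2 | h2
        · exact Or.inl h2
        · exact Or.inr (by rw [List.map_cons]; exact List.mem_cons_of_mem _ h2)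
      · rw [if_neg h2, if_neg]
        intro hcon; apply h2
        rcases hcon with h1 | h1
        · exact Or.inl h1
        · rw [List.map_cons, List.mem_cons] at h1
          rcases h1 with h1 | h1
          · exact Or.inl (h1 ▸ h)
          · exact Or.inr h1
    · have e1 : pvDistinct ks ((c :: t) ++ [kv])
          = pvSuffix c.1 :: pvDistinct (pvSuffix c.1 :: ks) (t ++ [kv]) := by
        simp [pvDistinct, h]
      have e2 : pvDistinct ks (c :: t)
          = pvSuffix c.1 :: pvDistinct (pvSuffix c.1 :: ks) t := by simp [pvDistinct, h]
      rw [e1, ih, e2, List.cons_append]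
      congr 1
      by_cases h2 : pvSuffix kv.1 ∈ (pvSuffix c.1 :: ks)
          ∨ pvSuffix kv.1 ∈ t.map (fun p => pvSuffix p.1)
      · rw [if_pos h2, if_pos]
        rcases h2 with h2 | h2
        · rw [List.mem_cons] at h2
          rcases h2 with h2 | h2
          · exact Or.inr (by rw [List.map_cons, h2]; exact List.mem_cons_self)
          · exact Or.inl h2
        · exact Or.inr (by rw [List.map_cons]; exact List.mem_cons_of_mem _ h2)
      · rw [if_neg h2, if_neg]
        intro hcon; apply h2
        rcases hcon with h1 | h1
        · exact Or.inl (List.mem_cons_of_mem _ h1)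
        · rw [List.map_cons, List.mem_cons] at h1
          rcases h1 with h1 | h1
          · exact Or.inl (by rw [List.mem_cons]; exact Or.inl h1)
          · exact Or.inr h1

theorem pvDistinct_nil_eq_dedup (l : List (String × List Int)) :
    pvDistinct [] l = PySem.List.dedup (l.map (fun p => pvSuffix p.1)) := by
  induction l using List.reverseRecOn with
  | nil => rfl
  | append_singleton t kv ih =>
    rw [pvDistinct_append_singleton, ih]
    simp only [List.map_append, List.map_cons, List.map_nil]
    rw [PySem.List.dedup_eq_ofList, PySem.List.dedup_eq_ofList,
        PySem.Set.ofList_append_singleton, PySem.Set.add_eq_ite]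
    by_cases h : pvSuffix kv.1 ∈ t.map (fun p => pvSuffix p.1)
    · rw [if_pos (Or.inr h), if_pos (by simp [PySem.Set.mem_ofList, h])]
      simp
    · rw [if_neg (by simp [h]), if_neg (by simp [PySem.Set.mem_ofList, h])]

theorem pvAlt_eq (l : List (String × List Int)) :
    merge_dict_by_suffix_alt l = (pvDistinct [] l).map (fun s => (s, pvGather s l)) := by
  unfold merge_dict_by_suffix_alt
  rw [pvDistinct_nil_eq_dedup]
  simp only [List.zip_map']
  apply List.map_congr_left
  intro s _
  congr 1
  simp [pvGather, List.flatMap_map]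

-- ===== VERDICT (by name: the statement is the Claim_ definition above) =====
theorem merge_dict_by_suffix_spec : Claim_equal_merge_dict_by_suffix := by
  intro diction _ _
  unfold Spec_merge_dict_by_suffix merge_dict_by_suffix
  rw [pvAlt_eq]
  have := pvFold_items diction PySem.Dict.empty (by simp [PySem.Dict.keys_empty])
  simpa [PySem.Dict.empty] using this
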